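-- pv_equiv track=rewrite | github.com/envomp/2018-Introduction-to-Programming | ktj1/exam.py | list_move
-- ===== SOURCE A (Python) =====
-- def list_move(initial_list: list, amount: int, factor: int) -> list:
--     """
--     Create amount lists where elements are shifted right by factor.
--
--     This function creates a list with amount of lists inside it.
--     In each sublist, elements are shifted right by factor elements.
--     factor >= 0
--
--     list_move(["a", "b", "c"], 3, 0) => [['a', 'b', 'c'], ['a', 'b', 'c'], ['a', 'b', 'c']]
--     list_move(["a", "b", "c"], 3, 1) => [['a', 'b', 'c'], ['c', 'a', 'b'], ['b', 'c', 'a']]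
--     list_move([1, 2, 3], 3, 2) => [[1, 2, 3], [2, 3, 1], [3, 1, 2]]
--     list_move([1, 2, 3], 4, 1) => [[1, 2, 3], [3, 1, 2], [2, 3, 1], [1, 2, 3]]
--     list_move([], 3, 4) => [[], [], [], []]
--     """
--     out = []
--
--     if factor > len(initial_list) and len(initial_list) > 0:
--         factor = factor % len(initial_list)
--
--     for i in range(amount):
--         out.append(initial_list)
--         initial_list = initial_list[-factor:] + initial_list[:-factor]
--
--     return out
-- ===== SOURCE B (Python) =====
-- def list_move(initial_list: list, amount: int, factor: int) -> list:
--     """Each output row is a direct rotation of the original list: row i is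
--     initial_list shifted right by (i * factor) mod n, no state carried between rows."""
--     n = len(initial_list)
--     if n == 0:
--         return [[] for _ in range(amount)]
--     rows = []
--     for i in range(amount):
--         shift = (i * factor) % n
--         rows.append(initial_list[-shift:] + initial_list[:-shift])
--     return rows
-- ===== Notes on version B (the rewrite author's own statement) =====
-- stated objective: alternative
-- what changed: Replaces A's carried accumulator (each row produced by re-slicing the previous row) with a per-index closed-form rotation of the original list, shift (i*factor) mod n computed independently for each row; Pre_ excludes factor < -len(initial_list) on nonempty lists when more than one row is requested, far outside the documented domain factor >= 0, where A's rows are an artefact of Python's slice clamping (the list is never shifted).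
-- outside the precondition, e.g. on list_move([1, 2], 2, -5): A returns [[1, 2], [1, 2]], B returns [[1, 2], [2, 1]]
import Mathlib
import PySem

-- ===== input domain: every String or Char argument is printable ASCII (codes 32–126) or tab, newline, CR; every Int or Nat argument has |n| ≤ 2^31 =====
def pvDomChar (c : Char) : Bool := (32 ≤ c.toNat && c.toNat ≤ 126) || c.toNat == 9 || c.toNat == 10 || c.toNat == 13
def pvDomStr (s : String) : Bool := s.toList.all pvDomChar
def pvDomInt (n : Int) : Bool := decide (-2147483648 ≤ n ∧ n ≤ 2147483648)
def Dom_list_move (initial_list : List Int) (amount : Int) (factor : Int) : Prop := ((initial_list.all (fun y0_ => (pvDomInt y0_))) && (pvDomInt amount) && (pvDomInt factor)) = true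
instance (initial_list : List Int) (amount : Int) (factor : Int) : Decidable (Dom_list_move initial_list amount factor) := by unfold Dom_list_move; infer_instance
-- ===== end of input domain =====

-- Alternative decomposition: B computes each output row as a closed-form rotation of the
-- original list (shift (i*factor) mod n per row) instead of A's accumulator carrying the previous row.


-- ===== PORT A =====
def list_move (initial_list : List Int) (amount : Int) (factor : Int) : List (List Int) :=
  let factor2 : Int :=
    if (initial_list.length : Int) < factor ∧ 0 < (initial_list.length : Int) then
      PySem.Int.mod factor (initial_list.length : Int)
    else factor
  ((PySem.List.pyRange 0 amount 1).foldl
    (fun (st : List (List Int) × List Int) _ =>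
      (st.1 ++ [st.2],
        PySem.List.slice st.2 (some (-factor2)) none
          ++ PySem.List.slice st.2 none (some (-factor2))))
    (([] : List (List Int)), initial_list)).1

-- ===== PORT B =====
def list_move_alt (initial_list : List Int) (amount : Int) (factor : Int) : List (List Int) :=
  let n : Int := initial_list.length
  if n = 0 then
    (PySem.List.pyRange 0 amount 1).map (fun _ => ([] : List Int))
  else
    (PySem.List.pyRange 0 amount 1).map (fun i =>
      let shift : Int := PySem.Int.mod (i * factor) n
      PySem.List.slice initial_list (some (-shift)) none
        ++ PySem.List.slice initial_list none (some (-shift)))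

-- ===== PRECONDITION & SPEC =====
-- Pre_ excludes factor < -len(initial_list) on nonempty lists with more than one row requested:
-- far outside the documented domain (the docstring states factor >= 0), and there A's rows are an
-- artefact of Python's slice clamping (the list is never shifted), while B performs the modular
-- rotation; with amount <= 1 or an empty list only the original row can appear, so those stay in.
def Pre_list_move (initial_list : List Int) (amount : Int) (factor : Int) : Prop :=
  -(initial_list.length : Int) ≤ factor ∨ initial_list = [] ∨ amount ≤ 1
instance (initial_list : List Int) (amount : Int) (factor : Int) : Decidable (Pre_list_move initial_list amount factor) := by unfold Pre_list_move; infer_instance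
def pvWitness_list_move : List Int × Int × Int := ([1, 2, 3], 4, 1)

def Spec_list_move (initial_list : List Int) (amount : Int) (factor : Int) (out : List (List Int)) : Prop := out = list_move_alt initial_list amount factor
instance (initial_list : List Int) (amount : Int) (factor : Int) (out : List (List Int)) : Decidable (Spec_list_move initial_list amount factor out) := by unfold Spec_list_move; infer_instance

-- ===== CLAIM (what is proved, stated in full; the proofs are below) =====
def Claim_equal_list_move : Prop := ∀ (initial_list : List Int) (amount : Int) (factor : Int), Dom_list_move initial_list amount factor → Pre_list_move initial_list amount factor → Spec_list_move initial_list amount factor (list_move initial_list amount factor)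

-- ===== LEMMAS AND PROOFS =====

lemma slice_nil_eq (a b : Option Int) : PySem.List.slice ([] : List Int) a b = [] := by
  rw [List.eq_nil_iff_forall_not_mem]
  intro x hx
  exact absurd (PySem.List.mem_of_mem_slice _ a b hx) (by simp)

lemma fold_spec {α β : Type} (g : β → β) :
    ∀ (r : List α) (acc : List β) (cur : β),
      (r.foldl (fun st _ => (st.1 ++ [st.2], g st.2)) (acc, cur)).1
        = acc ++ (List.range r.length).map (fun i => g^[i] cur)
  | [], acc, cur => by simp
  | _ :: t, acc, cur => by
      simp only [List.foldl_cons, fold_spec g t, List.length_cons]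
      rw [List.range_succ_eq_map]
      simp [List.map_map, Function.comp_def, Function.iterate_succ_apply]

lemma fold_specF (F : Int) (r : List Int) (acc : List (List Int)) (cur : List Int) :
    (r.foldl (fun st _ =>
        (st.1 ++ [st.2],
          PySem.List.slice st.2 (some (-F)) none ++ PySem.List.slice st.2 none (some (-F))))
      (acc, cur)).1
      = acc ++ (List.range r.length).map (fun i =>
          (fun X : List Int =>
            PySem.List.slice X (some (-F)) none ++ PySem.List.slice X none (some (-F)))^[i] cur) :=
  fold_spec (g := fun X : List Int =>
    PySem.List.slice X (some (-F)) none ++ PySem.List.slice X none (some (-F))) r acc cur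

lemma iter_nil (F : Int) (i : Nat) :
    (fun X : List Int =>
      PySem.List.slice X (some (-F)) none ++ PySem.List.slice X none (some (-F)))^[i] [] = [] := by
  induction i with
  | zero => rfl
  | succ i ih => rw [Function.iterate_succ_apply', ih]; simp [slice_nil_eq]

-- one step of the rotation row: slices from a (possibly negative) offset -F, for -N ≤ F ≤ N
lemma rot_step (X : List Int) (F : Int) (N : Nat) (hX : X.length = N) (hN : 0 < N)
    (hFlo : -(N : Int) ≤ F) (hFhi : F ≤ (N : Int)) :
    PySem.List.slice X (some (-F)) none ++ PySem.List.slice X none (some (-F))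
      = X.rotate (N - (F % (N : Int)).toNat) := by
  have hNz : ((N : Int)) ≠ 0 := by exact_mod_cast hN.ne'
  rcases lt_trichotomy F 0 with hFneg | rfl | hFpos
  · have h1 : (0 : Int) ≤ -F := by omega
    rw [PySem.List.slice_from X h1, PySem.List.slice_to X h1]
    have hmod : F % (N : Int) = F + N := by
      have h3 : (F + N) % (N : Int) = F % N := by
        have h4 := Int.add_mul_emod_self_left (a := F) (b := (N : Int)) (c := 1)
        simpa using h4
      rw [← h3, Int.emod_eq_of_lt (by omega) (by omega)]
    have ht : N - ((F + (N : Int))).toNat = (-F).toNat := by omega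
    rw [hmod, ht, List.rotate_eq_drop_append_take (by omega : (-F).toNat ≤ X.length)]
  · simp only [neg_zero, Int.zero_emod, Int.toNat_zero, Nat.sub_zero]
    rw [PySem.List.slice_from X le_rfl, PySem.List.slice_to X le_rfl]
    simp only [Int.toNat_zero, List.drop_zero, List.take_zero, List.append_nil]
    rw [← hX, List.rotate_length]
  · have hkpos : 0 < F.toNat := by omega
    have hcast : -F = -((F.toNat : Nat) : Int) := by omega
    rw [hcast, PySem.List.slice_from_neg_natCast X F.toNat hkpos,
        PySem.List.slice_to_neg_natCast X F.toNat hkpos]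
    rcases eq_or_lt_of_le hFhi with hFN | hFN
    · have hmod : F % (N : Int) = 0 := by rw [hFN, Int.emod_self]
      have ht : X.length - F.toNat = 0 := by omega
      rw [hmod, ht]
      simp only [Int.toNat_zero, Nat.sub_zero, List.drop_zero, List.take_zero, List.append_nil]
      rw [← hX, List.rotate_length]
    · have hmod : F % (N : Int) = F := Int.emod_eq_of_lt (by omega) hFN
      rw [hmod, List.rotate_eq_drop_append_take (by omega : N - F.toNat ≤ X.length), hX]

lemma modeq_E (L σ k : Nat) (hL : 0 < L) (hσ : σ < L) :
    (k * (L - σ)) % L = (L - (k * σ) % L) % L := by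
  have h1 : (k * σ) % L < L := Nat.mod_lt _ hL
  zify [hσ.le, h1.le]
  rw [mul_sub, Int.sub_emod, Int.sub_emod ((L : Int))]
  rw [Int.mul_emod_left, Int.emod_self, Int.emod_emod_of_dvd _ dvd_rfl]

-- ===== VERDICT (by name: the statement is the Claim_ definition above) =====
theorem list_move_spec : Claim_equal_list_move := by
  intro initial amount factor _ hpre
  show list_move initial amount factor = list_move_alt initial amount factor
  by_cases h0 : initial = []
  · subst h0
    simp only [list_move, list_move_alt]
    rw [fold_specF]
    simp [iter_nil, List.map_const', PySem.List.pyRange_one, Function.comp_def]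
  · have hN : 0 < initial.length := List.length_pos_iff.mpr h0
    have hn : (0 : Int) < (initial.length : Int) := by exact_mod_cast hN
    have hnz : ((initial.length : Int)) ≠ 0 := hn.ne'
    by_cases hA1 : amount ≤ 1
    · -- at most one row: both sides are [] or [initial_list]
      simp only [list_move, list_move_alt, if_neg hnz]
      rw [fold_specF, PySem.List.pyRange_one]
      by_cases hz : amount ≤ 0
      · have h' : (amount - 0).toNat = 0 := by omega
        rw [h']
        simp
      · have h' : (amount - 0).toNat = 1 := by omega
        rw [h']
        simp only [List.range_one, List.map_cons, List.map_nil]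
        have hsh : PySem.Int.mod ((0 + ((0 : Nat) : Int)) * factor) (initial.length : Int)
            = 0 := by
          norm_num [PySem.Int.mod]
        rw [hsh]
        simp only [neg_zero]
        rw [PySem.List.slice_from initial le_rfl, PySem.List.slice_to initial le_rfl]
        simp
    have hfac : -(initial.length : Int) ≤ factor := by
      rcases hpre with h | h | h
      · exact h
      · exact absurd h h0
      · exact absurd h hA1
    simp only [list_move, list_move_alt, if_neg hnz]
    set F2 : Int :=
      (if (initial.length : Int) < factor ∧ 0 < (initial.length : Int) then
        PySem.Int.mod factor (initial.length : Int) else factor) with hF2def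
    set σ : Nat := (factor % (initial.length : Int)).toNat with hσdef
    rw [fold_specF]
    have hmodnn : 0 ≤ factor % (initial.length : Int) := Int.emod_nonneg _ hnz
    have hmodlt : factor % (initial.length : Int) < (initial.length : Int) :=
      Int.emod_lt_of_pos _ hn
    have hσlt : σ < initial.length := by omega
    have hsσ : factor % (initial.length : Int) = (σ : Int) := by omega
    have hF2lo : -(initial.length : Int) ≤ F2 := by
      rw [hF2def]
      split_ifs with h
      · rw [PySem.Int.mod_eq_emod_of_pos hn]; omega
      · exact hfac
    have hF2hi : F2 ≤ (initial.length : Int) := by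
      rw [hF2def]
      split_ifs with h
      · rw [PySem.Int.mod_eq_emod_of_pos hn]; omega
      · omega
    have hF2mod : F2 % (initial.length : Int) = (σ : Int) := by
      rw [← hsσ, hF2def]
      split_ifs with h
      · rw [PySem.Int.mod_eq_emod_of_pos hn, Int.emod_emod_of_dvd _ dvd_rfl]
      · rfl
    have hiter : ∀ k : Nat,
        (fun X : List Int =>
          PySem.List.slice X (some (-F2)) none ++ PySem.List.slice X none (some (-F2)))^[k] initial
          = initial.rotate (k * (initial.length - σ)) := by
      intro k
      induction k with
      | zero => simp
      | succ k ih =>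
          rw [Function.iterate_succ_apply', ih]
          have hlen : (initial.rotate (k * (initial.length - σ))).length = initial.length :=
            List.length_rotate ..
          rw [rot_step _ F2 initial.length hlen hN hF2lo hF2hi, hF2mod]
          simp only [Int.toNat_natCast]
          rw [List.rotate_rotate, ← Nat.succ_mul]
    rw [PySem.List.pyRange_one]
    simp only [List.length_map, List.length_range, List.map_map]
    apply List.map_congr_left
    intro k _
    rw [hiter k]
    simp only [Function.comp_apply, zero_add]
    rw [PySem.Int.mod_eq_emod_of_pos hn]
    have hkfac : ((k : Int) * factor) % (initial.length : Int)
        = (((k * σ) % initial.length : Nat) : Int) := by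
      have h1 : ((k : Int) * factor) % (initial.length : Int)
          = ((k : Int) * (σ : Int)) % (initial.length : Int) := by
        conv_lhs => rw [Int.mul_emod]
        conv_rhs => rw [Int.mul_emod]
        rw [hsσ]
        have hcσ1 : (0 : Int) ≤ (σ : Int) := by omega
        have hcσ2 : ((σ : Int)) < (initial.length : Int) := by omega
        conv_rhs => rw [Int.emod_eq_of_lt hcσ1 hcσ2]
      rw [h1]
      norm_cast
    rw [hkfac]
    have hmle : (k * σ) % initial.length < initial.length := Nat.mod_lt _ hN
    -- B's row is a rotation of the original list
    have hrow : PySem.List.slice initial (some (-(((k * σ) % initial.length : Nat) : Int))) none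
        ++ PySem.List.slice initial none (some (-(((k * σ) % initial.length : Nat) : Int)))
        = initial.rotate (initial.length - (k * σ) % initial.length) := by
      have := rot_step initial (((k * σ) % initial.length : Nat) : Int) initial.length rfl hN
        (by omega) (by omega)
      rw [this, Int.emod_eq_of_lt (by omega) (by exact_mod_cast hmle), Int.toNat_natCast]
    rw [hrow]
    rw [← List.rotate_mod initial (k * (initial.length - σ)),
        ← List.rotate_mod initial (initial.length - (k * σ) % initial.length)]
    rw [modeq_E initial.length σ k hN hσlt]
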